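-- pv_equiv track=rewrite | github.com/laivinsvalters38-lgtm/meklesana | app.py | find_free_numbers
-- ===== SOURCE A (Python) =====
-- def find_free_numbers(used, how_many=50):
--     free = []
--     n = 1
--     used = set(used)
--     while len(free) < how_many:
--         if n not in used:
--             free.append(n)
--         n += 1
--     return free
-- ===== SOURCE B (Python) =====
-- def find_free_numbers(used, how_many=50):
--     used_set = set(used)
--     k = len(used_set)
--     n = max(how_many, 0)
--     pool = set(range(1, n + k + 1))
--     return sorted(pool - used_set)[:n]
-- ===== Notes on version B (the rewrite author's own statement) =====
-- stated objective: simpler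
-- what changed: Replaces A's unbounded while-loop that tests integers one by one with a closed-form construction: build the pool set(range(1, n+k+1)) (always large enough since at most k=len(set(used)) candidates are excluded), subtract the used set, sort, and slice the first max(how_many,0) entries.
import Mathlib
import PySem

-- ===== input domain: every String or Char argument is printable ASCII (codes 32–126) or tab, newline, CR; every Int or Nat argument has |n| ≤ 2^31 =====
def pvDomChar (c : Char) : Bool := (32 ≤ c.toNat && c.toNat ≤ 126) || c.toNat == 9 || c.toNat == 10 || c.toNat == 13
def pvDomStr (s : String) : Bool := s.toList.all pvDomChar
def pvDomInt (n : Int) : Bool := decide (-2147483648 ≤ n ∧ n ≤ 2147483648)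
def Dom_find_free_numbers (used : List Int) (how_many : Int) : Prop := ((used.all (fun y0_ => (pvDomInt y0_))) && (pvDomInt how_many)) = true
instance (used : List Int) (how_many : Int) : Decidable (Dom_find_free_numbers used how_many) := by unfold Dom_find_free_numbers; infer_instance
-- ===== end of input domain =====

-- B replaces A's one-by-one while-loop with a closed-form pool construction
-- (range minus used set, sorted, sliced); same return value, simpler code.

-- ===== PORT A =====
-- A's while loop: state (free, n); each iteration tests `n not in used`, appends, increments n.
-- `fuel` is only a termination guard: the loop body and exit test are A's own; the main proof
-- shows the fuel chosen in `find_free_numbers` is always enough for the loop to reach its exit.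
def findFreeLoop (usedS : PySem.Set Int) (how_many : Int) : Nat → List Int → Int → List Int
  | 0, free, _ => free
  | fuel + 1, free, n =>
    if (free.length : Int) < how_many then
      findFreeLoop usedS how_many fuel (if !usedS.contains n then free ++ [n] else free) (n + 1)
    else free

def find_free_numbers (used : List Int) (how_many : Int) : List Int :=
  let usedS : PySem.Set Int := PySem.Set.ofList used
  findFreeLoop usedS how_many (how_many.toNat + usedS.length) [] 1

-- ===== PORT B =====
-- Source B: used_set = set(used); k = len(used_set); n = max(how_many, 0);
--       pool = set(range(1, n + k + 1)); return sorted(pool - used_set)[:n]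
-- ([:n] with n ≥ 0 is `take n.toNat`, exact here).
def find_free_numbers_alt (used : List Int) (how_many : Int) : List Int :=
  let usedS : PySem.Set Int := PySem.Set.ofList used
  let k : Int := usedS.length
  let n : Int := max how_many 0
  let pool : PySem.Set Int := PySem.Set.ofList (PySem.List.pyRange 1 (n + k + 1))
  (PySem.List.sorted (pool.diff usedS) (fun x => x)).take n.toNat

-- ===== PRECONDITION & SPEC =====
def Spec_find_free_numbers (used : List Int) (how_many : Int) (out : List Int) : Prop := out = find_free_numbers_alt used how_many
instance (used : List Int) (how_many : Int) (out : List Int) : Decidable (Spec_find_free_numbers used how_many out) := by unfold Spec_find_free_numbers; infer_instance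

-- ===== CLAIM (what is proved, stated in full; the proofs are below) =====
def Claim_equal_find_free_numbers : Prop := ∀ (used : List Int) (how_many : Int), Dom_find_free_numbers used how_many → Spec_find_free_numbers used how_many (find_free_numbers used how_many)

-- ===== LEMMAS AND PROOFS =====

-- the free numbers among 1..c, in increasing order
def freeList (usedS : PySem.Set Int) (c : Nat) : List Int :=
  (PySem.List.pyRange 1 ((c : Int) + 1)).filter (fun x => !usedS.contains x)

theorem freeList_zero (usedS : PySem.Set Int) : freeList usedS 0 = [] := by
  simp [freeList, PySem.List.pyRange]

theorem freeList_succ (usedS : PySem.Set Int) (c : Nat) :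
    freeList usedS (c + 1) =
      freeList usedS c ++ (if !usedS.contains ((c : Int) + 1) then [((c : Int) + 1)] else []) := by
  unfold freeList
  rw [show ((c + 1 : Nat) : Int) + 1 = ((c : Int) + 1) + 1 by push_cast; ring]
  rw [PySem.List.pyRange_one_succ_right (by omega)]
  rw [List.filter_append]
  by_cases h : ((c : Int) + 1) ∈ usedS <;> simp [h]

theorem freeList_prefix (usedS : PySem.Set Int) (c d : Nat) :
    ∃ t, freeList usedS (c + d) = freeList usedS c ++ t := by
  induction d with
  | zero => exact ⟨[], by simp⟩
  | succ d ih =>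
    obtain ⟨t, ht⟩ := ih
    exact ⟨t ++ (if !usedS.contains (((c + d : Nat) : Int) + 1) then [((c + d : Nat) : Int) + 1] else []),
      by rw [show c + (d + 1) = (c + d) + 1 by omega, freeList_succ, ht, List.append_assoc]⟩

theorem length_pyRange_one_succ (N : Nat) :
    (PySem.List.pyRange 1 ((N : Int) + 1)).length = N := by
  induction N with
  | zero => simp [PySem.List.pyRange]
  | succ n ih =>
    rw [show ((n + 1 : Nat) : Int) + 1 = ((n : Int) + 1) + 1 by push_cast; ring]
    rw [PySem.List.pyRange_one_succ_right (by omega)]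
    simp [ih]

theorem freeList_count (usedS : PySem.Set Int) (m : Nat) :
    m ≤ (freeList usedS (m + usedS.length)).length := by
  unfold freeList
  have hlen : (PySem.List.pyRange 1 (((m + usedS.length : Nat) : Int) + 1)).length
      = m + usedS.length := length_pyRange_one_succ _
  set L := PySem.List.pyRange 1 (((m + usedS.length : Nat) : Int) + 1) with hL
  have hsplit : L.length = (L.filter (fun x => !usedS.contains x)).length
      + (L.filter (fun x => !(!usedS.contains x))).length :=
    List.length_eq_length_filter_add _
  have hnn : (L.filter (fun x => !(!usedS.contains x))) = L.filter (fun x => usedS.contains x) := by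
    apply List.filter_congr; intro x _; simp
  have hLnd : L.Nodup :=
    (PySem.List.pairwise_lt_pyRange_one 1 _).imp (fun h => ne_of_lt h)
  have hsub : (L.filter (fun x => usedS.contains x)) ⊆ usedS := by
    intro x hx
    have h2 := List.mem_filter.mp hx
    exact List.mem_of_elem_eq_true h2.2
  have hle : (L.filter (fun x => usedS.contains x)).length ≤ usedS.length :=
    (List.subperm_of_subset (hLnd.filter _) hsub).length_le
  rw [hnn] at hsplit
  omega

theorem loop_spec (usedS : PySem.Set Int) (hm : Int) :
    ∀ (fuel c : Nat), (freeList usedS c).length ≤ hm.toNat →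
      hm.toNat ≤ (freeList usedS (c + fuel)).length →
      findFreeLoop usedS hm fuel (freeList usedS c) ((c : Int) + 1)
        = (freeList usedS (c + fuel)).take hm.toNat := by
  intro fuel
  induction fuel with
  | zero =>
    intro c h1 h2
    simp only [findFreeLoop, Nat.add_zero]
    exact (List.take_of_length_le h1).symm
  | succ fuel ih =>
    intro c h1 h2
    simp only [findFreeLoop]
    by_cases hc : ((freeList usedS c).length : Int) < hm
    · rw [if_pos hc]
      have hstep := freeList_succ usedS c
      have hbody : (if !usedS.contains ((c : Int) + 1)
            then freeList usedS c ++ [((c : Int) + 1)] else freeList usedS c)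
          = freeList usedS (c + 1) := by
        rw [hstep]; by_cases h : ((c : Int) + 1) ∈ usedS <;> simp [h]
      rw [hbody]
      have h1' : (freeList usedS (c + 1)).length ≤ hm.toNat := by
        rw [hstep]
        by_cases h : ((c : Int) + 1) ∈ usedS <;> simp [h] <;> omega
      have h2' : hm.toNat ≤ (freeList usedS ((c + 1) + fuel)).length := by
        rw [show (c + 1) + fuel = c + (fuel + 1) by omega]; exact h2
      have harg : ((c : Int) + 1) + 1 = ((c + 1 : Nat) : Int) + 1 := by push_cast; ring
      rw [harg, ih (c + 1) h1' h2', show (c + 1) + fuel = c + (fuel + 1) by omega]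
    · rw [if_neg hc]
      have hlen : (freeList usedS c).length = hm.toNat := by omega
      obtain ⟨t, ht⟩ := freeList_prefix usedS c (fuel + 1)
      rw [ht, List.take_left' hlen]

theorem a_eq (used : List Int) (hm : Int) :
    find_free_numbers used hm
      = (freeList (PySem.Set.ofList used) (hm.toNat + (PySem.Set.ofList used).length)).take hm.toNat := by
  unfold find_free_numbers
  have h0 := freeList_zero (PySem.Set.ofList used)
  have := loop_spec (PySem.Set.ofList used) hm
      (hm.toNat + (PySem.Set.ofList used).length) 0
      (by simp [h0])
      (by simpa [h0] using freeList_count (PySem.Set.ofList used) hm.toNat)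
  simpa [h0] using this

theorem b_eq (used : List Int) (hm : Int) :
    find_free_numbers_alt used hm
      = (freeList (PySem.Set.ofList used) (hm.toNat + (PySem.Set.ofList used).length)).take hm.toNat := by
  show List.take (max hm 0).toNat
      (PySem.List.sorted
        ((PySem.Set.ofList
            (PySem.List.pyRange 1 (max hm 0 + ((PySem.Set.ofList used).length : Int) + 1))).diff
          (PySem.Set.ofList used)) (fun x => x)) = _
  have hmax : (max hm 0).toNat = hm.toNat := by omega
  have hcast : max hm 0 + ((PySem.Set.ofList used).length : Int) + 1
      = ((hm.toNat + (PySem.Set.ofList used).length : Nat) : Int) + 1 := by push_cast; omega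
  rw [hcast]
  set N := hm.toNat + (PySem.Set.ofList used).length with hN
  have hnd : (PySem.List.pyRange 1 ((N : Int) + 1)).Nodup :=
    (PySem.List.pairwise_lt_pyRange_one 1 ((N : Int) + 1)).imp (fun h => ne_of_lt h)
  rw [PySem.Set.ofList_eq_self_of_nodup _ hnd]
  have hdiff : PySem.Set.diff (PySem.List.pyRange 1 ((N : Int) + 1)) (PySem.Set.ofList used)
      = freeList (PySem.Set.ofList used) N := rfl
  rw [hdiff]
  have hpair : List.Pairwise (fun a b : Int => a < b) (freeList (PySem.Set.ofList used) N) :=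
    (PySem.List.pairwise_lt_pyRange_one 1 ((N : Int) + 1)).sublist List.filter_sublist
  rw [PySem.List.sorted_eq_of_perm_of_pairwise_lt _ _ _ (List.Perm.refl _) hpair, hmax]

-- ===== VERDICT (by name: the statement is the Claim_ definition above) =====
theorem find_free_numbers_spec : Claim_equal_find_free_numbers := by
  intro used how_many _
  unfold Spec_find_free_numbers
  rw [a_eq, b_eq]
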